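-- pv_equiv track=rewrite | github.com/BienveillanceMax/AnimaNLU | nlu-training/prepare_data.py | normalize_reminder_content_bio
-- ===== SOURCE A (Python) =====
-- _LISTE_WORDS = {"liste", "listes"}
--
-- _DE_WORDS = {"de", "d'", "du", "des"}
--
-- def normalize_reminder_content_bio(words: list[str],
--                                    tags: list[str]) -> list[str]:
--     """Normalize 'liste de X' reminder_content spans to Convention A.
--
--     Rule: if a B/I-reminder_content span starts on 'liste' and the following
--     token is a `de`-family word, push the span start past `liste de` onto the
--     content noun.
--
--     Example transformation:
--       words:  ['ouvre', 'ma', 'liste', 'de', 'vacances']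
--       before: [O,       O,    B-rc,    I-rc, I-rc]
--       after:  [O,       O,    O,       O,    B-rc]
--
--     Leaves Convention-A spans untouched (they never start on 'liste').
--     """
--     if len(words) != len(tags):
--         return tags
--     tags = list(tags)
--     lw = [w.lower() for w in words]
--     n = len(tags)
--
--     i = 0
--     while i < n:
--         t = tags[i]
--         if not t.startswith("B-reminder_content"):
--             i += 1
--             continue
--         # Walk to find span end
--         j = i + 1
--         while j < n and tags[j] == "I-reminder_content":
--             j += 1
--         # Span is [i, j). Check Convention B/C patterns.
--         if lw[i] in _LISTE_WORDS and i + 1 < j and lw[i + 1] in _DE_WORDS: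
--             # Convention B: span includes 'liste de'. Push start to i+2.
--             if i + 2 < j:
--                 tags[i] = "O"
--                 tags[i + 1] = "O"
--                 tags[i + 2] = "B-reminder_content"
--                 # tags[i+3:j] already I-reminder_content, leave them
--             else:
--                 # Span was only 'liste de' — clear it entirely (degenerate case)
--                 for k in range(i, j):
--                     tags[k] = "O"
--         elif lw[i] in _DE_WORDS:
--             # Convention C: span starts on 'de' — drop the preposition.
--             tags[i] = "O"
--             if i + 1 < j:
--                 tags[i + 1] = "B-reminder_content"
--             # else span was just a lone 'de', it's now all-O
--         i = j
--
--     return tags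
-- ===== SOURCE B (Python) =====
-- _LISTE_WORDS = {"liste", "listes"}
--
-- _DE_WORDS = {"de", "d'", "du", "des"}
--
-- _B = "B-reminder_content"
-- _I = "I-reminder_content"
--
--
-- def _replacement(w0, w1, t0, length):
--     """Closed-form replacement tag segment for one reminder_content span of
--     the given length, decided from its first two lowered words alone."""
--     if w0 in _LISTE_WORDS and length >= 2 and w1 in _DE_WORDS:
--         if length >= 3:
--             return ["O", "O", _B] + [_I] * (length - 3)
--         return ["O", "O"]
--     if w0 in _DE_WORDS:
--         if length >= 2:
--             return ["O", _B] + [_I] * (length - 2)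
--         return ["O"]
--     return [t0] + [_I] * (length - 1)
--
--
-- def normalize_reminder_content_bio(words, tags):
--     """Segment the tag sequence once into chunks (a reminder_content span, or
--     a single other tag), then rebuild the whole output front-to-back as the
--     concatenation of closed-form per-chunk replacement segments."""
--     if len(words) != len(tags):
--         return tags
--     lw = [w.lower() for w in words]
--
--     # cut points: start index of every chunk, plus the sentinel len(tags)
--     cuts = []
--     in_span = False
--     for k, t in enumerate(tags):
--         if t.startswith(_B):
--             cuts.append(k)
--             in_span = True
--         elif t == _I and in_span:
--             pass
--         else:
--             cuts.append(k)
--             in_span = False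
--     cuts.append(len(tags))
--
--     out = []
--     for a, b in zip(cuts, cuts[1:]):
--         if tags[a].startswith(_B):
--             out += _replacement(lw[a], lw[a + 1] if a + 1 < b else "",
--                                 tags[a], b - a)
--         else:
--             out.append(tags[a])
--     return out
-- ===== Notes on version B (the rewrite author's own statement) =====
-- stated objective: alternative
-- what changed: A rewrites the tag list in place with an index-jumping while-loop that edits individual cells inside each span; B instead segments the tag sequence once into chunk boundaries and rebuilds the whole output front-to-back as a concatenation of closed-form replacement segments computed from each chunk's length and first two lowered words (no in-place editing).
import Mathlib
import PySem

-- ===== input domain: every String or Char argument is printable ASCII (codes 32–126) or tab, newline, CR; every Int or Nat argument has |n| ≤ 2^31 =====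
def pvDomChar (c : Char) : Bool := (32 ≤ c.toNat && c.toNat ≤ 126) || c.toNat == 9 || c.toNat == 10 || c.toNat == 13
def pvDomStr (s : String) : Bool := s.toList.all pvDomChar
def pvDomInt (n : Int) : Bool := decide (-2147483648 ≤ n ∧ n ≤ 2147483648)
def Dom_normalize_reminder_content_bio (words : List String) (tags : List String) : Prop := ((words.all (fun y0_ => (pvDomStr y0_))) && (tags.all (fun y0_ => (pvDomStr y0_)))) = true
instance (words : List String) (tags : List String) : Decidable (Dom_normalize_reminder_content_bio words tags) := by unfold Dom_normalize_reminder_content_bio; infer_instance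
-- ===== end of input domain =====

-- B replaces A's in-place index-jumping rewrite loop by a segment-and-rebuild scheme:
-- compute chunk boundaries once, then concatenate closed-form replacement segments.
-- Objective: alternative decomposition, same cost.

-- ===== PORT A =====

-- inner while loop of A: walk past consecutive 'I-reminder_content' tags
def aWalk (tags : List String) (n : Nat) (j : Nat) : Nat :=
  if _h : j < n then
    if tags.getD j "" = "I-reminder_content" then aWalk tags n (j + 1) else j
  else j
termination_by n - j

-- needed by aLoop's termination proof (the Python loop sets i = j with j > i)
theorem aWalk_ge (tags : List String) (n : Nat) (j : Nat) : j ≤ aWalk tags n j := by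
  fun_induction aWalk with
  | case1 j h heq ih => omega
  | case2 j h heq => omega
  | case3 j h => omega

-- outer while loop of A, tags mutated in place
def aLoop (lw : List String) (n : Nat) (tags : List String) (i : Nat) : List String :=
  if _h : i < n then
    if PySem.Str.startswith (tags.getD i "") "B-reminder_content" then
      let j := aWalk tags n (i + 1)
      let tags' :=
        if (lw.getD i "" = "liste" ∨ lw.getD i "" = "listes") ∧ i + 1 < j ∧
            (lw.getD (i+1) "" = "de" ∨ lw.getD (i+1) "" = "d'" ∨
             lw.getD (i+1) "" = "du" ∨ lw.getD (i+1) "" = "des") then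
          if i + 2 < j then
            ((tags.set i "O").set (i+1) "O").set (i+2) "B-reminder_content"
          else
            -- for k in range(i, j): tags[k] = "O"
            (List.range' i (j - i)).foldl (fun t k => t.set k "O") tags
        else if (lw.getD i "" = "de" ∨ lw.getD i "" = "d'" ∨
                 lw.getD i "" = "du" ∨ lw.getD i "" = "des") then
          let t0 := tags.set i "O"
          if i + 1 < j then t0.set (i+1) "B-reminder_content" else t0
        else tags
      aLoop lw n tags' j
    else aLoop lw n tags (i + 1)
  else tags
termination_by n - i
decreasing_by
  · have := aWalk_ge tags n (i + 1); omega
  · omega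

def normalize_reminder_content_bio (words : List String) (tags : List String) : List String :=
  if words.length ≠ tags.length then tags
  else
    let lw := words.map (fun w => PySem.Str.lower w)
    aLoop lw tags.length tags 0

-- ===== PORT B =====

-- _replacement(w0, w1, t0, length): closed-form replacement segment for one span
def bReplacement (w0 w1 t0 : String) (length : Nat) : List String :=
  if (w0 = "liste" ∨ w0 = "listes") ∧ 2 ≤ length ∧
      (w1 = "de" ∨ w1 = "d'" ∨ w1 = "du" ∨ w1 = "des") then
    if 3 ≤ length then
      ["O", "O", "B-reminder_content"] ++ List.replicate (length - 3) "I-reminder_content"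
    else ["O", "O"]
  else if w0 = "de" ∨ w0 = "d'" ∨ w0 = "du" ∨ w0 = "des" then
    if 2 ≤ length then
      ["O", "B-reminder_content"] ++ List.replicate (length - 2) "I-reminder_content"
    else ["O"]
  else [t0] ++ List.replicate (length - 1) "I-reminder_content"

-- cut-point loop body: state = (cuts, in_span)
def bCutStep (st : List Nat × Bool) (e : String × Nat) : List Nat × Bool :=
  match st, e with
  | (cuts, ins), (t, k) =>
    if PySem.Str.startswith t "B-reminder_content" then (cuts ++ [k], true)
    else if t = "I-reminder_content" ∧ ins = true then (cuts, ins)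
    else (cuts ++ [k], false)

-- all chunk start indices, plus the sentinel len(tags)
def bCuts (tags : List String) : List Nat :=
  (tags.zipIdx.foldl bCutStep ([], false)).1 ++ [tags.length]

-- output contribution of one chunk [a, b)
def bSeg (lw tags : List String) (a b : Nat) : List String :=
  if PySem.Str.startswith (tags.getD a "") "B-reminder_content" then
    bReplacement (lw.getD a "") (if a + 1 < b then lw.getD (a+1) "" else "")
      (tags.getD a "") (b - a)
  else [tags.getD a ""]

def normalize_reminder_content_bio_alt (words : List String) (tags : List String) : List String :=
  if words.length ≠ tags.length then tags
  else
    let lw := words.map (fun w => PySem.Str.lower w)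
    let cuts := bCuts tags
    (cuts.zip cuts.tail).foldl (fun out ab => out ++ bSeg lw tags ab.1 ab.2) []

-- ===== PRECONDITION & SPEC =====
def Spec_normalize_reminder_content_bio (words : List String) (tags : List String) (out : List String) : Prop := out = normalize_reminder_content_bio_alt words tags
instance (words : List String) (tags : List String) (out : List String) : Decidable (Spec_normalize_reminder_content_bio words tags out) := by unfold Spec_normalize_reminder_content_bio; infer_instance

-- ===== CLAIM (what is proved, stated in full; the proofs are below) =====
def Claim_equal_normalize_reminder_content_bio : Prop := ∀ (words : List String) (tags : List String), Dom_normalize_reminder_content_bio words tags → Spec_normalize_reminder_content_bio words tags (normalize_reminder_content_bio words tags)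

-- ===== LEMMAS AND PROOFS =====

-- proof-side chunk decomposition of the output, following A's scan boundaries
def chunksFrom (lw tags : List String) (n i : Nat) : List String :=
  if _h : i < n then
    if PySem.Str.startswith (tags.getD i "") "B-reminder_content" then
      bSeg lw tags i (aWalk tags n (i + 1)) ++ chunksFrom lw tags n (aWalk tags n (i + 1))
    else tags.getD i "" :: chunksFrom lw tags n (i + 1)
  else []
termination_by n - i
decreasing_by
  · have := aWalk_ge tags n (i + 1); omega
  · omega

-- proof-side cut-point list from position i with in_span flag
def cutsFrom (tags : List String) (n i : Nat) (ins : Bool) : List Nat :=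
  if _h : i < n then
    if PySem.Str.startswith (tags.getD i "") "B-reminder_content" then
      i :: cutsFrom tags n (i + 1) true
    else if tags.getD i "" = "I-reminder_content" ∧ ins = true then
      cutsFrom tags n (i + 1) ins
    else i :: cutsFrom tags n (i + 1) false
  else []
termination_by n - i

theorem aWalk_le_or (tags : List String) (n : Nat) (j : Nat) :
    aWalk tags n j ≤ n ∨ aWalk tags n j = j := by
  fun_induction aWalk with
  | case1 j h1 heq ih => omega
  | case2 j h1 heq => omega
  | case3 j h1 => omega

theorem aWalk_le (tags : List String) (n : Nat) (j : Nat) (h : j ≤ n) :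
    aWalk tags n j ≤ n := by
  have := aWalk_le_or tags n j; omega

theorem aWalk_isI (tags : List String) (n : Nat) (j : Nat) :
    ∀ m, j ≤ m → m < aWalk tags n j → tags.getD m "" = "I-reminder_content" := by
  fun_induction aWalk with
  | case1 j h heq ih =>
    intro m hm1 hm2
    rcases Nat.eq_or_lt_of_le hm1 with h' | h'
    · rw [← h']; exact heq
    · exact ih m h' hm2
  | case2 j h heq => intro m hm1 hm2; omega
  | case3 j h => intro m hm1 hm2; omega

theorem aWalk_stop (tags : List String) (n : Nat) (j : Nat) :
    n ≤ aWalk tags n j ∨ tags.getD (aWalk tags n j) "" ≠ "I-reminder_content" := by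
  fun_induction aWalk with
  | case1 j h heq ih => exact ih
  | case2 j h heq => exact Or.inr heq
  | case3 j h =>
    by_cases hI : tags.getD j "" = "I-reminder_content"
    · left; omega
    · exact Or.inr hI

theorem startswithB_ne_I (t : String) (h : PySem.Str.startswith t "B-reminder_content" = true) :
    t ≠ "I-reminder_content" := by
  intro he; subst he; revert h; decide

-- aWalk only reads indices ≥ j
theorem aWalk_agree (a b : List String) (n : Nat) (j : Nat)
    (h : ∀ m, j ≤ m → a.getD m "" = b.getD m "") : aWalk a n j = aWalk b n j := by
  fun_induction aWalk a n j with
  | case1 j hj hI ih =>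
    have hb : aWalk b n j = aWalk b n (j + 1) := by
      rw [aWalk, dif_pos hj, if_pos (by rw [← h j le_rfl]; exact hI)]
    rw [hb]; exact ih (fun m hm => h m (by omega))
  | case2 j hj hI =>
    rw [aWalk, dif_pos hj, if_neg (by rw [← h j le_rfl]; exact hI)]
  | case3 j hj => rw [aWalk, dif_neg hj]

-- chunksFrom only reads tag indices ≥ i
theorem chunksFrom_agree (lw a b : List String) (n : Nat) (i : Nat)
    (h : ∀ m, i ≤ m → a.getD m "" = b.getD m "") : chunksFrom lw a n i = chunksFrom lw b n i := by
  fun_induction chunksFrom lw a n i with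
  | case1 i hi hB ih =>
    have hw : aWalk a n (i + 1) = aWalk b n (i + 1) :=
      aWalk_agree a b n (i + 1) (fun m hm => h m (by omega))
    have hb : chunksFrom lw b n i
        = bSeg lw b i (aWalk b n (i + 1)) ++ chunksFrom lw b n (aWalk b n (i + 1)) := by
      rw [chunksFrom, dif_pos hi, if_pos (by rw [← h i le_rfl]; exact hB)]
    have hseg : bSeg lw a i (aWalk a n (i + 1)) = bSeg lw b i (aWalk a n (i + 1)) := by
      unfold bSeg; rw [h i le_rfl]
    rw [hb, ← hw, ← hseg]
    exact congrArg _ (ih (fun m hm => h m (by have := aWalk_ge a n (i + 1); omega)))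
  | case2 i hi hB ih =>
    have hb : chunksFrom lw b n i = b.getD i "" :: chunksFrom lw b n (i + 1) := by
      rw [chunksFrom, dif_pos hi, if_neg (by rw [← h i le_rfl]; exact hB)]
    rw [hb, ← h i le_rfl]
    exact congrArg _ (ih (fun m hm => h m (by omega)))
  | case3 i hi =>
    rw [chunksFrom, dif_neg hi]

theorem getD_set_ne (l : List String) (k m : Nat) (v : String) (h : k ≠ m) :
    (l.set k v).getD m "" = l.getD m "" := by
  simp [List.getD_eq_getElem?_getD, List.getElem?_set_ne h]

theorem getD_set_self (l : List String) (k : Nat) (v : String) (h : k < l.length) :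
    (l.set k v).getD k "" = v := by
  simp [List.getD_eq_getElem?_getD, List.getElem?_set_self (by simpa using h)]

theorem getD_append_replicate (pre : List String) (cnt k : Nat) (h : k < cnt) :
    (pre ++ List.replicate cnt "I-reminder_content").getD (pre.length + k) ""
      = "I-reminder_content" := by
  rw [List.getD_eq_getElem?_getD, List.getElem?_append_right (by omega)]
  simp [h]

theorem getD_foldl_setO_out (l : List String) (i c m : Nat) (h : m < i ∨ i + c ≤ m) :
    ((List.range' i c).foldl (fun t k => t.set k "O") l).getD m "" = l.getD m "" := by
  induction c generalizing l i with
  | zero => simp [List.range']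
  | succ c ih =>
    rw [List.range'_succ, List.foldl_cons, ih _ _ (by omega)]
    exact getD_set_ne l i m "O" (by omega)

theorem getD_foldl_setO_in (l : List String) (i c m : Nat) (h1 : i ≤ m) (h2 : m < i + c)
    (hm : m < l.length) :
    ((List.range' i c).foldl (fun t k => t.set k "O") l).getD m "" = "O" := by
  induction c generalizing l i with
  | zero => omega
  | succ c ih =>
    rw [List.range'_succ, List.foldl_cons]
    rcases Nat.eq_or_lt_of_le h1 with h' | h'
    · subst h'
      rw [getD_foldl_setO_out _ _ _ _ (by omega)]
      exact getD_set_self _ _ _ hm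
    · exact ih (l.set i "O") (i + 1) h' (by omega) (by simpa using hm)

theorem foldl_setO_length (l : List String) (r : List Nat) :
    (r.foldl (fun t k => t.set k "O") l).length = l.length := by
  induction r generalizing l with
  | nil => rfl
  | cons a r ih => rw [List.foldl_cons, ih]; simp

-- pointwise characterisation → take/append shape
theorem take_eq_append (u v seg : List String) (i j : Nat)
    (hij : i ≤ j) (hj : j ≤ v.length) (hu : u.length = v.length)
    (hseg : seg.length = j - i)
    (hpre : ∀ m, m < i → u.getD m "" = v.getD m "")
    (hin : ∀ m, i ≤ m → m < j → u.getD m "" = seg.getD (m - i) "") :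
    u.take j = v.take i ++ seg := by
  apply List.ext_getElem
  · simp [hu, hseg]; omega
  · intro m hm1 hm2
    have hmj : m < j := by simpa [hu, hj] using hm1
    have hgu : (u.take j)[m] = u.getD m "" := by
      rw [List.getElem_take]
      simp [List.getD_eq_getElem?_getD, List.getElem?_eq_getElem (by omega : m < u.length)]
    by_cases hmi : m < i
    · have hr : (v.take i ++ seg)[m] = v.getD m "" := by
        rw [List.getElem_append_left (by simp; omega)]
        rw [List.getElem_take]
        simp [List.getD_eq_getElem?_getD, List.getElem?_eq_getElem (by omega : m < v.length)]
      rw [hgu, hr, hpre m hmi]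
    · have hlen : (v.take i).length = i := by simp; omega
      have hr : (v.take i ++ seg)[m] = seg.getD (m - i) "" := by
        rw [List.getElem_append_right (by omega)]
        simp [hlen, List.getD_eq_getElem?_getD,
          List.getElem?_eq_getElem (show m - i < seg.length by rw [hseg]; omega)]
      rw [hgu, hr, hin m (by omega) hmj]

-- the in-place edits of one span produce exactly B's closed-form segment
theorem span_take_eq (lw tags : List String) (n i j : Nat)
    (hn : n = tags.length) (hi : i < n)
    (hB : PySem.Str.startswith (tags.getD i "") "B-reminder_content" = true)
    (hjdef : j = aWalk tags n (i + 1)) :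
    (if (lw.getD i "" = "liste" ∨ lw.getD i "" = "listes") ∧ i + 1 < j ∧
        (lw.getD (i+1) "" = "de" ∨ lw.getD (i+1) "" = "d'" ∨
         lw.getD (i+1) "" = "du" ∨ lw.getD (i+1) "" = "des") then
      if i + 2 < j then
        ((tags.set i "O").set (i+1) "O").set (i+2) "B-reminder_content"
      else
        (List.range' i (j - i)).foldl (fun t k => t.set k "O") tags
    else if (lw.getD i "" = "de" ∨ lw.getD i "" = "d'" ∨
             lw.getD i "" = "du" ∨ lw.getD i "" = "des") then
      (if i + 1 < j then (tags.set i "O").set (i+1) "B-reminder_content" else tags.set i "O")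
    else tags).take j
      = tags.take i ++ bSeg lw tags i j := by
  have hij : i + 1 ≤ j := by rw [hjdef]; exact aWalk_ge tags n (i + 1)
  have hjn : j ≤ n := by rw [hjdef]; exact aWalk_le tags n (i + 1) (by omega)
  have hI : ∀ m, i < m → m < j → tags.getD m "" = "I-reminder_content" := by
    intro m h1 h2
    rw [hjdef] at h2
    exact aWalk_isI tags n (i + 1) m (by omega) h2
  have hbseg : bSeg lw tags i j =
      (if (lw.getD i "" = "liste" ∨ lw.getD i "" = "listes") ∧ i + 1 < j ∧
          (lw.getD (i+1) "" = "de" ∨ lw.getD (i+1) "" = "d'" ∨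
           lw.getD (i+1) "" = "du" ∨ lw.getD (i+1) "" = "des") then
        if i + 2 < j then
          ["O", "O", "B-reminder_content"] ++ List.replicate (j - i - 3) "I-reminder_content"
        else ["O", "O"]
      else if (lw.getD i "" = "de" ∨ lw.getD i "" = "d'" ∨
               lw.getD i "" = "du" ∨ lw.getD i "" = "des") then
        if i + 1 < j then
          ["O", "B-reminder_content"] ++ List.replicate (j - i - 2) "I-reminder_content"
        else ["O"]
      else [tags.getD i ""] ++ List.replicate (j - i - 1) "I-reminder_content") := by
    unfold bSeg bReplacement
    rw [if_pos hB]
    by_cases hlt : i + 1 < j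
    · rw [if_pos hlt]
      simp only [show (2 ≤ j - i) ↔ (i + 1 < j) by omega,
        show (3 ≤ j - i) ↔ (i + 2 < j) by omega]
    · rw [if_neg hlt]
      have hx1 : ¬ ((lw.getD i "" = "liste" ∨ lw.getD i "" = "listes") ∧ 2 ≤ j - i ∧
          (("" : String) = "de" ∨ ("" : String) = "d'" ∨
           ("" : String) = "du" ∨ ("" : String) = "des")) :=
        fun hc => absurd hc.2.1 (by omega : ¬ 2 ≤ j - i)
      have hx2 : ¬ ((lw.getD i "" = "liste" ∨ lw.getD i "" = "listes") ∧ i + 1 < j ∧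
          (lw.getD (i+1) "" = "de" ∨ lw.getD (i+1) "" = "d'" ∨
           lw.getD (i+1) "" = "du" ∨ lw.getD (i+1) "" = "des")) :=
        fun hc => hlt hc.2.1
      rw [if_neg hx1, if_neg hx2]
      simp only [show (2 ≤ j - i) ↔ (i + 1 < j) by omega]
  rw [hbseg]
  by_cases c1 : (lw.getD i "" = "liste" ∨ lw.getD i "" = "listes") ∧ i + 1 < j ∧
      (lw.getD (i+1) "" = "de" ∨ lw.getD (i+1) "" = "d'" ∨
       lw.getD (i+1) "" = "du" ∨ lw.getD (i+1) "" = "des")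
  · rw [if_pos c1, if_pos c1]
    by_cases c2 : i + 2 < j
    · rw [if_pos c2, if_pos c2]
      apply take_eq_append _ _ _ i j (by omega) (by omega) (by simp)
        (by simp; omega)
      · intro mm hm
        rw [getD_set_ne _ _ _ _ (by omega), getD_set_ne _ _ _ _ (by omega),
            getD_set_ne _ _ _ _ (by omega)]
      · intro mm hm1 hm2
        rcases (by omega : mm = i ∨ mm = i + 1 ∨ mm = i + 2 ∨ i + 2 < mm) with h | h | h | h
        · rw [h, Nat.sub_self, getD_set_ne _ _ _ _ (by omega),
              getD_set_ne _ _ _ _ (by omega), getD_set_self _ _ _ (by omega)]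
          rfl
        · rw [h, show i + 1 - i = 1 by omega, getD_set_ne _ _ _ _ (by omega),
              getD_set_self _ _ _ (by simp; omega)]
          rfl
        · rw [h, show i + 2 - i = 2 by omega,
              getD_set_self _ _ _ (by simp; omega)]
          rfl
        · rw [getD_set_ne _ _ _ _ (by omega), getD_set_ne _ _ _ _ (by omega),
              getD_set_ne _ _ _ _ (by omega), hI mm (by omega) hm2,
              show mm - i = (["O", "O", "B-reminder_content"] : List String).length
                + (mm - i - 3) by simp; omega,
              getD_append_replicate _ _ _ (by omega)]
    · rw [if_neg c2, if_neg c2]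
      apply take_eq_append _ _ _ i j (by omega) (by omega) (foldl_setO_length _ _)
        (show (["O", "O"] : List String).length = j - i by simp; omega)
      · intro mm hm; exact getD_foldl_setO_out _ _ _ _ (by omega)
      · intro mm hm1 hm2
        rw [getD_foldl_setO_in _ _ _ _ hm1 (by omega) (by omega)]
        rcases (by omega : mm = i ∨ mm = i + 1) with h | h
        · rw [h, Nat.sub_self]
          rfl
        · rw [h, show i + 1 - i = 1 by omega]
          rfl
  · rw [if_neg c1, if_neg c1]
    by_cases c3 : lw.getD i "" = "de" ∨ lw.getD i "" = "d'" ∨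
        lw.getD i "" = "du" ∨ lw.getD i "" = "des"
    · rw [if_pos c3, if_pos c3]
      by_cases c4 : i + 1 < j
      · rw [if_pos c4, if_pos c4]
        apply take_eq_append _ _ _ i j (by omega) (by omega) (by simp)
          (by simp; omega)
        · intro mm hm
          rw [getD_set_ne _ _ _ _ (by omega), getD_set_ne _ _ _ _ (by omega)]
        · intro mm hm1 hm2
          rcases (by omega : mm = i ∨ mm = i + 1 ∨ i + 1 < mm) with h | h | h
          · rw [h, Nat.sub_self, getD_set_ne _ _ _ _ (by omega),
                getD_set_self _ _ _ (by omega)]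
            rfl
          · rw [h, show i + 1 - i = 1 by omega,
                getD_set_self _ _ _ (by simp; omega)]
            rfl
          · rw [getD_set_ne _ _ _ _ (by omega), getD_set_ne _ _ _ _ (by omega),
                hI mm (by omega) hm2,
                show mm - i = (["O", "B-reminder_content"] : List String).length
                  + (mm - i - 2) by simp; omega,
                getD_append_replicate _ _ _ (by omega)]
      · rw [if_neg c4, if_neg c4]
        apply take_eq_append _ _ _ i j (by omega) (by omega) (by simp)
          (show (["O"] : List String).length = j - i by simp; omega)
        · intro mm hm; exact getD_set_ne _ _ _ _ (by omega)
        · intro mm hm1 hm2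
          have h : mm = i := by omega
          rw [h, Nat.sub_self, getD_set_self _ _ _ (by omega)]
          rfl
    · rw [if_neg c3, if_neg c3]
      apply take_eq_append _ _ _ i j (by omega) (by omega) rfl
        (by simp; omega)
      · intro mm hm; rfl
      · intro mm hm1 hm2
        rcases Nat.eq_or_lt_of_le hm1 with h | h
        · rw [← h, Nat.sub_self]
          rfl
        · rw [hI mm h hm2,
              show mm - i = ([tags.getD i ""] : List String).length
                + (mm - i - 1) by simp; omega,
              getD_append_replicate _ _ _ (by omega)]

-- A's loop = prefix-preserving chunk rebuild
theorem aLoop_eq (lw : List String) (n : Nat) (tags : List String) (i : Nat)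
    (hn : n = tags.length) :
    aLoop lw n tags i = tags.take i ++ chunksFrom lw tags n i := by
  fun_induction aLoop lw n tags i with
  | case1 tags i hi hB j tags' ih =>
    have hjdef : j = aWalk tags n (i + 1) := rfl
    have htags' : tags' =
        (if (lw.getD i "" = "liste" ∨ lw.getD i "" = "listes") ∧ i + 1 < j ∧
            (lw.getD (i+1) "" = "de" ∨ lw.getD (i+1) "" = "d'" ∨
             lw.getD (i+1) "" = "du" ∨ lw.getD (i+1) "" = "des") then
          if i + 2 < j then
            ((tags.set i "O").set (i+1) "O").set (i+2) "B-reminder_content"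
          else
            (List.range' i (j - i)).foldl (fun t k => t.set k "O") tags
        else if (lw.getD i "" = "de" ∨ lw.getD i "" = "d'" ∨
                 lw.getD i "" = "du" ∨ lw.getD i "" = "des") then
          (if i + 1 < j then (tags.set i "O").set (i+1) "B-reminder_content" else tags.set i "O")
        else tags) := rfl
    have hn' : n = tags'.length := by
      rw [htags']
      split_ifs <;> simp [hn, foldl_setO_length]
    have hij : i + 1 ≤ j := by rw [hjdef]; exact aWalk_ge tags n (i + 1)
    have htake : tags'.take j = tags.take i ++ bSeg lw tags i j := by
      rw [htags']
      exact span_take_eq lw tags n i j hn hi hB hjdef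
    have hagree : ∀ m, j ≤ m → tags'.getD m "" = tags.getD m "" := by
      intro m hm
      rw [htags']
      split_ifs
      · rw [getD_set_ne _ _ _ _ (by omega), getD_set_ne _ _ _ _ (by omega),
            getD_set_ne _ _ _ _ (by omega)]
      · exact getD_foldl_setO_out _ _ _ _ (by omega)
      · rw [getD_set_ne _ _ _ _ (by omega), getD_set_ne _ _ _ _ (by omega)]
      · exact getD_set_ne _ _ _ _ (by omega)
      · rfl
    have hchunk : chunksFrom lw tags n i
        = bSeg lw tags i j ++ chunksFrom lw tags n j := by
      rw [chunksFrom, dif_pos hi, if_pos hB]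
    rw [ih hn', chunksFrom_agree lw tags' tags n j hagree, htake, hchunk,
        List.append_assoc]
  | case2 tags i hi hB ih =>
    have hchunk : chunksFrom lw tags n i
        = tags.getD i "" :: chunksFrom lw tags n (i + 1) := by
      rw [chunksFrom, dif_pos hi, if_neg hB]
    have htake : tags.take (i + 1) = tags.take i ++ [tags.getD i ""] := by
      rw [List.take_add_one]
      congr 1
      simp [List.getD_eq_getElem?_getD,
        List.getElem?_eq_getElem (show i < tags.length by omega)]
    rw [ih hn, hchunk, htake, List.append_assoc]
    rfl
  | case3 tags i hi =>
    rw [chunksFrom, dif_neg hi, List.append_nil,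
        List.take_of_length_le (by omega)]

-- ===== B side =====

-- the cut fold from position i with accumulator
theorem cutfold_go (tags : List String) (s : List String) (i : Nat)
    (acc : List Nat) (ins : Bool)
    (hs : s = tags.drop i) (hi : i ≤ tags.length) :
    ((s.zipIdx i).foldl bCutStep (acc, ins)).1 = acc ++ cutsFrom tags tags.length i ins := by
  induction s generalizing i acc ins with
  | nil =>
    have hin : i = tags.length := by
      have h2 : tags.length ≤ i := by
        by_contra hc
        rw [List.drop_eq_getElem_cons (by omega)] at hs
        exact List.cons_ne_nil _ _ hs.symm
      omega
    subst hin
    rw [cutsFrom, dif_neg (by omega)]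
    simp [List.zipIdx]
  | cons t s' ih =>
    have hlt : i < tags.length := by
      by_contra hge
      rw [List.drop_eq_nil_iff.mpr (by omega)] at hs
      exact List.cons_ne_nil _ _ hs
    rw [List.drop_eq_getElem_cons hlt] at hs
    obtain ⟨ht, hs'⟩ := List.cons_eq_cons.mp hs
    have htD : tags.getD i "" = t := by
      simp [List.getD_eq_getElem?_getD, List.getElem?_eq_getElem hlt, ht]
    rw [List.zipIdx_cons, List.foldl_cons]
    by_cases hB : PySem.Str.startswith t "B-reminder_content" = true
    · have hstep : bCutStep (acc, ins) (t, i) = (acc ++ [i], true) := by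
        rw [bCutStep, if_pos hB]
      rw [hstep, ih (i + 1) _ true hs' (by omega)]
      conv_rhs => rw [cutsFrom]
      rw [dif_pos hlt, if_pos (by rw [htD]; exact hB)]
      simp
    · by_cases hI : t = "I-reminder_content" ∧ ins = true
      · have hstep : bCutStep (acc, ins) (t, i) = (acc, ins) := by
          rw [bCutStep, if_neg hB, if_pos hI]
        rw [hstep, ih (i + 1) acc ins hs' (by omega)]
        conv_rhs => rw [cutsFrom]
        rw [dif_pos hlt, if_neg (by rw [htD]; exact hB),
            if_pos (by rw [htD]; exact hI)]
      · have hstep : bCutStep (acc, ins) (t, i) = (acc ++ [i], false) := by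
          rw [bCutStep, if_neg hB, if_neg hI]
        rw [hstep, ih (i + 1) _ false hs' (by omega)]
        conv_rhs => rw [cutsFrom]
        rw [dif_pos hlt, if_neg (by rw [htD]; exact hB),
            if_neg (by rw [htD]; exact hI)]
        simp

theorem bCuts_eq (tags : List String) :
    bCuts tags = cutsFrom tags tags.length 0 false ++ [tags.length] := by
  unfold bCuts
  rw [cutfold_go tags tags 0 [] false rfl (by omega)]
  simp

-- inside a span, the true-flag cut scan skips to the span end
theorem cutsFrom_skip (tags : List String) (n j0 : Nat) :
    cutsFrom tags n j0 true = cutsFrom tags n (aWalk tags n j0) true := by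
  fun_induction aWalk tags n j0 with
  | case1 j hj hI ih =>
    rw [← ih]
    conv_lhs => rw [cutsFrom]
    rw [dif_pos hj, if_neg (fun hB => (startswithB_ne_I _ hB) hI), if_pos ⟨hI, rfl⟩]
  | case2 j hj hI => rfl
  | case3 j hj => rfl

-- at a chunk boundary the flag no longer matters
theorem cutsFrom_flag (tags : List String) (n j : Nat)
    (h : n ≤ j ∨ tags.getD j "" ≠ "I-reminder_content") :
    cutsFrom tags n j true = cutsFrom tags n j false := by
  by_cases hj : j < n
  · have hne : tags.getD j "" ≠ "I-reminder_content" := by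
      rcases h with h | h
      · omega
      · exact h
    have e1 : cutsFrom tags n j true
        = (if PySem.Str.startswith (tags.getD j "") "B-reminder_content" = true then
            j :: cutsFrom tags n (j + 1) true
          else j :: cutsFrom tags n (j + 1) false) := by
      rw [cutsFrom, dif_pos hj]
      by_cases hB : PySem.Str.startswith (tags.getD j "") "B-reminder_content" = true
      · rw [if_pos hB, if_pos hB]
      · rw [if_neg hB, if_neg hB, if_neg (fun hc => hne hc.1)]
    have e2 : cutsFrom tags n j false
        = (if PySem.Str.startswith (tags.getD j "") "B-reminder_content" = true then
            j :: cutsFrom tags n (j + 1) true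
          else j :: cutsFrom tags n (j + 1) false) := by
      rw [cutsFrom, dif_pos hj]
      by_cases hB : PySem.Str.startswith (tags.getD j "") "B-reminder_content" = true
      · rw [if_pos hB, if_pos hB]
      · rw [if_neg hB, if_neg hB, if_neg (fun hc => Bool.false_ne_true hc.2)]
    rw [e1, e2]
  · rw [cutsFrom, dif_neg hj, cutsFrom, dif_neg hj]

-- head of the remaining cut list is the current position
theorem cutsFrom_false_head (tags : List String) (n i : Nat) (hi : i < n) :
    cutsFrom tags n i false = i :: cutsFrom tags n (i + 1)
      (PySem.Str.startswith (tags.getD i "") "B-reminder_content") := by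
  conv_lhs => rw [cutsFrom]
  rw [dif_pos hi]
  by_cases hB : PySem.Str.startswith (tags.getD i "") "B-reminder_content" = true
  · rw [if_pos hB, hB]
  · rw [if_neg hB, if_neg (by simp_all), eq_false_of_ne_true hB]

-- B's pair fold over the cut list = the chunk decomposition
theorem pairfold_eq (lw tags : List String) (n : Nat) (hn : n = tags.length)
    (i : Nat) (hi : i ≤ n) :
    ∀ out : List String,
    (((cutsFrom tags n i false ++ [n]).zip (cutsFrom tags n i false ++ [n]).tail).foldl
      (fun out ab => out ++ bSeg lw tags ab.1 ab.2) out)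
      = out ++ chunksFrom lw tags n i := by
  fun_induction chunksFrom lw tags n i with
  | case1 i hi' hB ih =>
    intro out
    have hij : i + 1 ≤ aWalk tags n (i + 1) := aWalk_ge tags n (i + 1)
    have hjn : aWalk tags n (i + 1) ≤ n := aWalk_le tags n (i + 1) (by omega)
    have hrest : cutsFrom tags n (i + 1) true
        = cutsFrom tags n (aWalk tags n (i + 1)) false := by
      rw [cutsFrom_skip tags n (i + 1), cutsFrom_flag]
      rcases aWalk_stop tags n (i + 1) with h | h
      · left; omega
      · right; exact h
    have hhead : cutsFrom tags n i false
        = i :: cutsFrom tags n (aWalk tags n (i + 1)) false := by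
      rw [cutsFrom_false_head tags n i hi', hB, hrest]
    have hnext : ∀ (l : List Nat),
        cutsFrom tags n (aWalk tags n (i + 1)) false ++ [n] = l →
        l.headD 0 = aWalk tags n (i + 1) := by
      intro l hl
      by_cases hjlt : aWalk tags n (i + 1) < n
      · rw [cutsFrom_false_head tags n _ hjlt] at hl
        rw [← hl]; rfl
      · have hje : aWalk tags n (i + 1) = n := by omega
        rw [hje] at hl ⊢
        rw [cutsFrom, dif_neg (by omega)] at hl
        rw [← hl]; rfl
    rcases hl : cutsFrom tags n (aWalk tags n (i + 1)) false ++ [n] with _ | ⟨c, rest⟩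
    · exact absurd hl (by simp)
    · have hc : c = aWalk tags n (i + 1) := by
        have := hnext (c :: rest) hl; simpa using this
      subst hc
      rw [hhead]
      simp only [List.cons_append, List.tail_cons, hl, List.zip_cons_cons, List.foldl_cons]
      have hstep := ih (by omega) (out ++ bSeg lw tags i (aWalk tags n (i + 1)))
      rw [hl] at hstep
      simp only [List.tail_cons] at hstep
      rw [hstep, List.append_assoc]
  | case2 i hi' hB ih =>
    intro out
    have hhead : cutsFrom tags n i false = i :: cutsFrom tags n (i + 1) false := by
      rw [cutsFrom_false_head tags n i hi', eq_false_of_ne_true hB]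
    have hnext : ∀ (l : List Nat), cutsFrom tags n (i+1) false ++ [n] = l →
        l.headD 0 = i + 1 := by
      intro l hl
      by_cases hlt : i + 1 < n
      · rw [cutsFrom_false_head tags n (i+1) hlt] at hl
        rw [← hl]; rfl
      · have hje : i + 1 = n := by omega
        rw [hje] at hl ⊢
        rw [cutsFrom, dif_neg (by omega)] at hl
        rw [← hl]; rfl
    rcases hl : cutsFrom tags n (i + 1) false ++ [n] with _ | ⟨c, rest⟩
    · exact absurd hl (by simp)
    · have hc : c = i + 1 := by have := hnext (c :: rest) hl; simpa using this
      subst hc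
      rw [hhead]
      simp only [List.cons_append, List.tail_cons, hl, List.zip_cons_cons, List.foldl_cons]
      have hseg : bSeg lw tags i (i + 1) = [tags.getD i ""] := by
        unfold bSeg; rw [if_neg hB]
      have hstep := ih (by omega) (out ++ bSeg lw tags i (i + 1))
      rw [hl] at hstep
      simp only [List.tail_cons] at hstep
      rw [hstep, hseg, List.append_assoc]
      rfl
  | case3 i hi' =>
    intro out
    rw [cutsFrom, dif_neg hi']
    simp

-- ===== VERDICT (by name: the statement is the Claim_ definition above) =====
theorem normalize_reminder_content_bio_spec : Claim_equal_normalize_reminder_content_bio := by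
  intro words tags _
  unfold Spec_normalize_reminder_content_bio normalize_reminder_content_bio
    normalize_reminder_content_bio_alt
  by_cases h : words.length ≠ tags.length
  · rw [if_pos h, if_pos h]
  · rw [if_neg h, if_neg h]
    simp only [bCuts_eq]
    rw [pairfold_eq (words.map (fun w => PySem.Str.lower w)) tags tags.length rfl 0
        (by omega) [],
      aLoop_eq (words.map (fun w => PySem.Str.lower w)) tags.length tags 0 rfl]
    simp
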